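-- pv_equiv track=rewrite | github.com/Myster1o619/static_site_generator | src/nodes.py | check_for_sequential_numbers
-- ===== SOURCE A (Python) =====
-- def check_for_sequential_numbers(split_text):
--     # if the first item doesn't follow MD format, can immediately return
--     MD_LIST_ITEM_ONE_CHECK = "1. "
--     numbers = []
--     if split_text[0] != MD_LIST_ITEM_ONE_CHECK:
--         return numbers
--
--     # loop and get the numbers - this is only checking 1-99 - recursion for more?
--     for item in split_text:
--         if item[0].isnumeric() and item[1] == "." and item[2] == " ":
--             numbers.append(int(item[0]))
--         if item[0].isnumeric() and item[1].isnumeric() and item[2] == "." and item[3] == " ":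
--             numbers.append(int(item[0:2]))
--
--     if len(numbers) == 1 and numbers[0] == MD_LIST_ITEM_ONE_CHECK:
--         # only one item, but it's an OL?
--         return numbers
--
--     if len(numbers) > 1:
--         # are the number in order - 1 => x?
--         sequential_list = sorted(numbers) == list(range(min(numbers), max(numbers)+1))
--         if sequential_list:
--             return numbers
--         else:
--             # if not sequential, clear what's inside numbers and return empty list
--             numbers.clear()
--     return numbers
-- ===== SOURCE B (Python) =====
-- def check_for_sequential_numbers(split_text):
--     if not split_text or split_text[0] != "1. ":
--         return []
--     # stage 1: parse "N. ..." prefixes (slice-based guards, so short items never raise)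
--     numbers = []
--     counts = [0] * 100  # bucket array: how often each possible value 0..99 was seen
--     for item in split_text:
--         if item[1:3] == ". " and item[0:1].isnumeric():
--             n = int(item[0])
--         elif item[2:4] == ". " and item[0:2].isnumeric():
--             n = int(item[0:2])
--         else:
--             continue
--         numbers.append(n)
--         counts[n] += 1
--     if len(numbers) <= 1:
--         return numbers
--     # stage 2: sequential iff no bucket holds a duplicate and the marked buckets
--     # form one contiguous block (first and last marked bucket span exactly len buckets)
--     if max(counts) > 1:
--         return []
--     lo = counts.index(1)
--     hi = 99 - counts[::-1].index(1)
--     if hi - lo + 1 == len(numbers):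
--         return numbers
--     return []
-- ===== Notes on version B (the rewrite author's own statement) =====
-- stated objective: alternative
-- what changed: B replaces A's sort-and-compare-with-range sequentiality test by a counting-sort-style bucket array over the value range 0..99 (duplicates = a bucket above 1, contiguity = first/last marked bucket span equals the count), and parses items with slice-based guards instead of A's chained raw index tests.
import Mathlib
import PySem

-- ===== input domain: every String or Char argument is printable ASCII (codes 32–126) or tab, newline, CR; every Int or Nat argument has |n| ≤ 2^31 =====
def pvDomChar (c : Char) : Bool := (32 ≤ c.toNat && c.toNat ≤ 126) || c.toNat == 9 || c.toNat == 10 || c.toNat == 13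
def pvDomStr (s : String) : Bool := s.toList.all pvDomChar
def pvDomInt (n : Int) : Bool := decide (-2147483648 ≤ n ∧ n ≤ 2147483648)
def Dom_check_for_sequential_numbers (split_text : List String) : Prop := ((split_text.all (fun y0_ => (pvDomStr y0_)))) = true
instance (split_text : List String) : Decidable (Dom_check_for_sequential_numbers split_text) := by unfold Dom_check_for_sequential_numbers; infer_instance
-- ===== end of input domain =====

-- B replaces A's sort-and-compare-with-range sequentiality test by a counting bucket array over
-- the value range 0..99 (duplicate = a bucket above 1; contiguous = first/last marked bucket
-- span = count), with slice-based parse guards; proved equal to A wherever A returns.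

-- ===== PORT A =====
-- one loop step of A's `for item in split_text:` body; the chars are item[0],item[1],item[2],item[3]
-- ('?' stands in for an out-of-range read, which Pre_ excludes — Python raises IndexError there);
-- `.isnumeric()` is ported as isdigit, exact on the ASCII domain Dom_.
def pvStepA (numbers : List Int) (item : String) : List Int :=
  let cs := item.toList
  let c0 := PySem.List.pyGetD cs 0 '?'
  let c1 := PySem.List.pyGetD cs 1 '?'
  let c2 := PySem.List.pyGetD cs 2 '?'
  let c3 := PySem.List.pyGetD cs 3 '?'
  let numbers :=
    if PySem.Chars.isdigit c0 && (c1 == '.') && (c2 == ' ') then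
      numbers ++ [(PySem.Int.ofChars? [c0]).getD 0]            -- int(item[0]); guard makes it a digit
    else numbers
  if PySem.Chars.isdigit c0 && PySem.Chars.isdigit c1 && (c2 == '.') && (c3 == ' ') then
    numbers ++ [(PySem.Int.ofChars? (PySem.List.slice cs (some 0) (some 2))).getD 0]  -- int(item[0:2])
  else numbers

def check_for_sequential_numbers (split_text : List String) : List Int :=
  let numbers : List Int := []
  if PySem.List.pyGetD split_text 0 "" ≠ "1. " then numbers
  else
    let numbers := split_text.foldl pvStepA numbers
    -- `len(numbers) == 1 and numbers[0] == "1. "`: an int never equals a str, so the branch is dead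
    if numbers.length = 1 ∧ False then numbers
    else if 1 < numbers.length then
      let mn := (PySem.List.min? numbers (fun x => x)).getD 0
      let mx := (PySem.List.max? numbers (fun x => x)).getD 0
      if PySem.List.sorted numbers (fun x => x) false = PySem.List.pyRange mn (mx + 1) 1 then numbers
      else []
    else numbers

-- ===== PORT B =====
-- Source B's parse: `item[1:3] == ". " and item[0:1].isnumeric()` etc.; slices never raise;
-- int(item[0]) / int(item[0:2]) as in A; isnumeric ported as strIsdigit (ASCII-exact)
def pvParseB (item : String) : Option Int :=
  let cs := item.toList
  if PySem.List.slice cs (some 1) (some 3) == ['.', ' '] &&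
     PySem.Chars.strIsdigit (PySem.List.slice cs (some 0) (some 1)) then
    some ((PySem.Int.ofChars? [PySem.List.pyGetD cs 0 '?']).getD 0)  -- int(item[0]); len ≥ 3 here
  else if PySem.List.slice cs (some 2) (some 4) == ['.', ' '] &&
     PySem.Chars.strIsdigit (PySem.List.slice cs (some 0) (some 2)) then
    some ((PySem.Int.ofChars? (PySem.List.slice cs (some 0) (some 2))).getD 0)  -- int(item[0:2])
  else none

-- Source B's loop body: numbers.append(n); counts[n] += 1  (n is 0..99 by the parse guard, so the
-- plain set/get at index n.toNat is exact for Python's counts[n])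
def pvStepB (st : List Int × List Int) (item : String) : List Int × List Int :=
  match pvParseB item with
  | none => st
  | some n => (st.1 ++ [n], st.2.set n.toNat (PySem.List.pyGetD st.2 n 0 + 1))

def check_for_sequential_numbers_alt (split_text : List String) : List Int :=
  match split_text with
  | [] => []
  | first :: _ =>
    if first ≠ "1. " then []
    else
      let st := split_text.foldl pvStepB ([], List.replicate 100 0)
      let numbers := st.1
      let counts := st.2
      if numbers.length ≤ 1 then numbers
      else if 1 < (PySem.List.max? counts (fun x => x)).getD 0 then []  -- max(counts) > 1
      else
        let lo : Int := ((PySem.List.index? counts 1).getD 0 : Nat)     -- counts.index(1)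
        let hi : Int := 99 - (((PySem.List.index? counts.reverse 1).getD 0 : Nat) : Int)  -- 99 - counts[::-1].index(1)
        if hi - lo + 1 = (numbers.length : Int) then numbers else []

-- ===== PRECONDITION & SPEC =====
-- Python A indexes item[0..3] without length checks: Pre_ excludes exactly the inputs where that
-- raises IndexError (empty split_text, or — when the loop is reached — an item too short for the
-- chained tests); everywhere else A returns normally.
def pvSafeChars : List Char → Bool
  | [] => false
  | [c0] => !(PySem.Chars.isdigit c0)
  | [c0, c1] => !(PySem.Chars.isdigit c0) || ((c1 != '.') && !(PySem.Chars.isdigit c1))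
  | [c0, c1, c2] => !(PySem.Chars.isdigit c0) || !(PySem.Chars.isdigit c1) || (c2 != '.')
  | _ => true

def Pre_check_for_sequential_numbers (split_text : List String) : Prop :=
  split_text ≠ [] ∧
    (split_text.headD "" = "1. " → ∀ item ∈ split_text, pvSafeChars item.toList = true)
instance (split_text : List String) : Decidable (Pre_check_for_sequential_numbers split_text) := by
  unfold Pre_check_for_sequential_numbers; infer_instance

def pvWitness_check_for_sequential_numbers : List String := ["1. one", "2. two"]

def Spec_check_for_sequential_numbers (split_text : List String) (out : List Int) : Prop := out = check_for_sequential_numbers_alt split_text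
instance (split_text : List String) (out : List Int) : Decidable (Spec_check_for_sequential_numbers split_text out) := by unfold Spec_check_for_sequential_numbers; infer_instance

-- ===== CLAIM (what is proved, stated in full; the proofs are below) =====
def Claim_equal_check_for_sequential_numbers : Prop := ∀ (split_text : List String), Dom_check_for_sequential_numbers split_text → Pre_check_for_sequential_numbers split_text → Spec_check_for_sequential_numbers split_text (check_for_sequential_numbers split_text)

-- ===== LEMMAS AND PROOFS =====

-- concrete slice shapes used by B's guards
lemma pvS13 (cs : List Char) : PySem.List.slice cs (some 1) (some 3) = (cs.drop 1).take 2 := by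
  rw [PySem.List.slice_toNat cs (a := 1) (b := 3) (by norm_num) (by norm_num)]; rfl
lemma pvS24 (cs : List Char) : PySem.List.slice cs (some 2) (some 4) = (cs.drop 2).take 2 := by
  rw [PySem.List.slice_toNat cs (a := 2) (b := 4) (by norm_num) (by norm_num)]; rfl
lemma pvS01 (cs : List Char) : PySem.List.slice cs (some 0) (some 1) = cs.take 1 := by
  rw [PySem.List.slice_toNat cs (a := 0) (b := 1) (by norm_num) (by norm_num)]; rfl
lemma pvS02 (cs : List Char) : PySem.List.slice cs (some 0) (some 2) = cs.take 2 := by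
  rw [PySem.List.slice_toNat cs (a := 0) (b := 2) (by norm_num) (by norm_num)]; rfl
lemma pvSD1 (c : Char) : PySem.Chars.strIsdigit [c] = PySem.Chars.isdigit c := by
  simp [PySem.Chars.strIsdigit]
lemma pvSD2 (c d : Char) :
    PySem.Chars.strIsdigit [c, d] = (PySem.Chars.isdigit c && PySem.Chars.isdigit d) := by
  simp [PySem.Chars.strIsdigit]
lemma pvDotNotDigit : PySem.Chars.isdigit '.' = false := by decide

lemma pvDigit_mem (c : Char) (h : PySem.Chars.isdigit c = true) :
    c ∈ ['0','1','2','3','4','5','6','7','8','9'] := by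
  simp [PySem.Chars.isdigit, Char.le_def, UInt32.le_iff_toNat_le] at h
  obtain ⟨h1, h2⟩ := h
  have hv : c.toNat = 48 ∨ c.toNat = 49 ∨ c.toNat = 50 ∨ c.toNat = 51 ∨ c.toNat = 52 ∨
      c.toNat = 53 ∨ c.toNat = 54 ∨ c.toNat = 55 ∨ c.toNat = 56 ∨ c.toNat = 57 := by omega
  have he : ∀ n, c.toNat = n → c = Char.ofNat n := by
    intro n hn; subst hn; exact (Char.ofNat_toNat c).symm
  rcases hv with h|h|h|h|h|h|h|h|h|h <;> rw [he _ h] <;> decide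

lemma pvVal1_bound (c : Char) (h : PySem.Chars.isdigit c = true) :
    0 ≤ (PySem.Int.ofChars? [c]).getD 0 ∧ (PySem.Int.ofChars? [c]).getD 0 < 100 := by
  have := pvDigit_mem c h
  fin_cases this <;> exact ⟨by decide, by decide⟩

lemma pvVal2_bound (c d : Char) (hc : PySem.Chars.isdigit c = true)
    (hd : PySem.Chars.isdigit d = true) :
    0 ≤ (PySem.Int.ofChars? [c, d]).getD 0 ∧ (PySem.Int.ofChars? [c, d]).getD 0 < 100 := by
  have h1 := pvDigit_mem c hc
  have h2 := pvDigit_mem d hd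
  fin_cases h1 <;> fin_cases h2 <;> exact ⟨by decide, by decide⟩

-- one A-loop step appends exactly what B's slice-guarded parse yields
set_option maxHeartbeats 1000000 in
lemma pvStepA_eq (numbers : List Int) (item : String) :
    pvStepA numbers item = numbers ++ (pvParseB item).toList := by
  unfold pvStepA pvParseB
  cases hcs : item.toList with
  | nil => simp [PySem.List.pyGetD_ofNat', pvS13, pvS24, pvS01, pvS02]
  | cons c0 t0 =>
    cases t0 with
    | nil => simp [PySem.List.pyGetD_ofNat', pvS13, pvS24, pvS01, pvS02, pvSD1]
    | cons c1 t1 =>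
      cases t1 with
      | nil => simp [PySem.List.pyGetD_ofNat', pvS13, pvS24, pvS01, pvS02, pvSD1, pvSD2]
      | cons c2 t2 =>
        cases t2 with
        | nil =>
          simp only [PySem.List.pyGetD_ofNat', pvS13, pvS24, pvS01, pvS02, pvSD1, pvSD2,
            List.getD_cons_zero, List.getD_cons_succ, List.getD_nil, List.drop_succ_cons,
            List.drop_zero, List.take_succ_cons, List.take_zero, List.take_nil, List.drop_nil]
          by_cases hd : PySem.Chars.isdigit c0 <;>
            by_cases h1 : c1 = '.' <;> by_cases h2 : c2 = ' ' <;>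
              by_cases hd1 : PySem.Chars.isdigit c1 <;>
                simp_all [pvDotNotDigit]
        | cons c3 t3 =>
          simp only [PySem.List.pyGetD_ofNat', pvS13, pvS24, pvS01, pvS02, pvSD1, pvSD2,
            List.getD_cons_zero, List.getD_cons_succ, List.drop_succ_cons,
            List.drop_zero, List.take_succ_cons, List.take_zero]
          by_cases hd : PySem.Chars.isdigit c0 <;>
            by_cases h1 : c1 = '.' <;> by_cases h2 : c2 = ' ' <;>
              by_cases hd1 : PySem.Chars.isdigit c1 <;>
                by_cases h2' : c2 = '.' <;> by_cases h3 : c3 = ' ' <;>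
                  simp_all [pvDotNotDigit]

-- A's whole loop is a filterMap of B's parse
lemma pvLoopA_gen (l : List String) (init : List Int) :
    l.foldl pvStepA init = init ++ l.filterMap pvParseB := by
  induction l generalizing init with
  | nil => simp
  | cons x t ih =>
    simp only [List.foldl_cons, List.filterMap_cons, pvStepA_eq]
    cases pvParseB x <;> simp [ih]

-- B's loop splits into the same filterMap plus a bucket-count fold over it
def pvBump (cnts : List Int) (n : Int) : List Int :=
  cnts.set n.toNat (PySem.List.pyGetD cnts n 0 + 1)

lemma pvLoopB_gen (l : List String) (ns cs : List Int) :
    l.foldl pvStepB (ns, cs) =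
      (ns ++ l.filterMap pvParseB, (l.filterMap pvParseB).foldl pvBump cs) := by
  induction l generalizing ns cs with
  | nil => simp
  | cons x t ih =>
    simp only [List.foldl_cons, List.filterMap_cons, pvStepB]
    cases pvParseB x with
    | none => simpa using ih ns cs
    | some n => simp [ih, pvBump]

-- every parsed value lies in 0..99
lemma pvParseB_bound (item : String) (n : Int) (h : pvParseB item = some n) :
    0 ≤ n ∧ n < 100 := by
  unfold pvParseB at h
  cases hcs : item.toList with
  | nil => rw [hcs] at h; simp [pvS13, pvS24] at h
  | cons c0 t0 =>
    rw [hcs] at h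
    simp only [pvS13, pvS24, pvS01, pvS02, List.take_succ_cons, List.take_zero] at h
    split_ifs at h with hg1 hg2
    · simp only [Bool.and_eq_true, beq_iff_eq, pvSD1] at hg1
      have h0 : PySem.List.pyGetD (c0 :: t0) (0 : Int) '?' = c0 := by
        simp [PySem.List.pyGetD_ofNat']
      rw [h0] at h
      obtain ⟨hl, hr⟩ := pvVal1_bound c0 hg1.2
      cases h; exact ⟨hl, hr⟩
    · simp only [Bool.and_eq_true, beq_iff_eq] at hg2
      cases t0 with
      | nil => exfalso; simpa using hg2.1
      | cons c1 t1 =>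
        simp only [List.take_succ_cons, List.take_zero, pvSD2, Bool.and_eq_true] at hg2 h
        obtain ⟨hc0, hc1⟩ := hg2.2
        obtain ⟨hl, hr⟩ := pvVal2_bound c0 c1 hc0 hc1
        cases h; exact ⟨hl, hr⟩

lemma pvNums_bound (l : List String) :
    ∀ n ∈ l.filterMap pvParseB, 0 ≤ n ∧ n < 100 := by
  intro n hn
  obtain ⟨item, -, hp⟩ := List.mem_filterMap.mp hn
  exact pvParseB_bound item n hp

-- counts after the bucket fold: entry i holds how often value i was appended
lemma pvCounts_chars (nums : List Int) (hb : ∀ n ∈ nums, 0 ≤ n ∧ n < 100) :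
    ∀ cs : List Int, cs.length = 100 →
      (nums.foldl pvBump cs).length = 100 ∧
        ∀ i : Nat, i < 100 → (nums.foldl pvBump cs)[i]? =
          some (cs[i]?.getD 0 + (List.count (i : Int) nums : Int)) := by
  induction nums with
  | nil =>
    intro cs hlen
    refine ⟨hlen, fun i hi => ?_⟩
    simp [List.getElem?_eq_getElem (by omega : i < cs.length)]
  | cons n t ih =>
    intro cs hlen
    obtain ⟨hn0, hn1⟩ := hb n (by simp)
    have hset : (pvBump cs n).length = 100 := by simp [pvBump, hlen]
    have hlt : n < (cs.length : Int) := by rw [hlen]; exact_mod_cast hn1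
    have hget : PySem.List.pyGetD cs n 0 = cs[n.toNat]'(by omega) :=
      PySem.List.pyGetD_eq_getElem cs 0 hn0 hlt
    obtain ⟨ih1, ih2⟩ := ih (fun x hx => hb x (by simp [hx])) (pvBump cs n) hset
    refine ⟨by simpa using ih1, fun i hi => ?_⟩
    rw [List.foldl_cons, ih2 i hi]
    have hbump : (pvBump cs n)[i]? =
        if n.toNat = i then some (cs[n.toNat]'(by omega) + 1) else cs[i]? := by
      simp [pvBump, hget, List.getElem?_set, hlen]
      split_ifs with hni
      · subst hni; simp [List.getElem?_eq_getElem (by omega : n.toNat < cs.length)]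
      · rfl
    rw [hbump]
    by_cases hni : n.toNat = i
    · have hn : n = (i : Int) := by omega
      simp [hn, List.count_cons,
        List.getElem?_eq_getElem (by omega : i < cs.length)]
      ring
    · have hn : n ≠ (i : Int) := by omega
      simp [hni, hn]

-- compute index? from a first-occurrence description
lemma pvIndex?_eq (v : Int) : ∀ (xs : List Int) (k : Nat) (hk : k < xs.length),
    xs[k] = v → (∀ j (hj : j < k), xs[j]'(by omega) ≠ v) →
      PySem.List.index? xs v = some k := by
  intro xs
  induction xs with
  | nil => intro k hk; simp at hk
  | cons x t ih =>
    intro k hk hx hprev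
    cases k with
    | zero => simp at hx; subst hx; exact PySem.List.index?_cons_self x t
    | succ k' =>
      have hxv : x ≠ v := by
        have := hprev 0 (by omega); simpa using this
      rw [PySem.List.index?_cons_of_ne t hxv]
      rw [ih k' (by simpa using hk) (by simpa using hx)
        (fun j hj => by have := hprev (j+1) (by omega); simpa using this)]
      rfl

-- the sort-equals-range test ⟷ no-duplicates ∧ span = count (for ≥ 2 elements)
lemma pvSeq_iff (nums : List Int) (h2 : 1 < nums.length) :
    (PySem.List.sorted nums (fun x => x) false =
       PySem.List.pyRange ((PySem.List.min? nums (fun x => x)).getD 0)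
         (((PySem.List.max? nums (fun x => x)).getD 0) + 1) 1)
      ↔ (nums.Nodup ∧
         ((PySem.List.max? nums (fun x => x)).getD 0) -
           ((PySem.List.min? nums (fun x => x)).getD 0) + 1 = (nums.length : Int)) := by
  have hne : nums ≠ [] := by intro h; subst h; simp at h2
  obtain ⟨m, hm⟩ : ∃ m, PySem.List.min? nums (fun x => x) = some m := by
    cases h : PySem.List.min? nums (fun x => x) with
    | none => exact absurd ((PySem.List.min?_eq_none_iff nums (fun x => x)).mp h) hne
    | some m => exact ⟨m, rfl⟩
  obtain ⟨M, hM⟩ : ∃ M, PySem.List.max? nums (fun x => x) = some M := by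
    cases h : PySem.List.max? nums (fun x => x) with
    | none => exact absurd ((PySem.List.max?_eq_none_iff nums (fun x => x)).mp h) hne
    | some M => exact ⟨M, rfl⟩
  rw [hm, hM]
  simp only [Option.getD_some]
  have hmin : ∀ y ∈ nums, m ≤ y := PySem.List.min?_isMin hm
  have hmax : ∀ y ∈ nums, y ≤ M := PySem.List.max?_isMax hM
  constructor
  · intro h
    have hp : (PySem.List.pyRange m (M + 1) 1).Perm nums := by
      rw [← h]; exact PySem.List.sorted_perm nums (fun x => x) false
    have hnd : nums.Nodup := hp.nodup_iff.mp (PySem.List.nodup_pyRange_one m (M + 1))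
    have hlen := hp.length_eq
    rw [PySem.List.length_pyRange_one] at hlen
    constructor
    · exact hnd
    · omega
  · rintro ⟨hnd, hspan⟩
    have hrnd : (PySem.List.pyRange m (M + 1) 1).Nodup := PySem.List.nodup_pyRange_one m (M + 1)
    have hlen : (PySem.List.pyRange m (M + 1) 1).length = nums.length := by
      rw [PySem.List.length_pyRange_one]; omega
    have hsub : nums.toFinset ⊆ (PySem.List.pyRange m (M + 1) 1).toFinset := by
      intro x hx
      rw [List.mem_toFinset] at hx ⊢
      exact (PySem.List.mem_pyRange_one).mpr ⟨hmin x hx, by have := hmax x hx; omega⟩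
    have hcards : (PySem.List.pyRange m (M + 1) 1).toFinset.card ≤ nums.toFinset.card := by
      rw [List.toFinset_card_of_nodup hnd, List.toFinset_card_of_nodup hrnd, hlen]
    have hfeq : nums.toFinset = (PySem.List.pyRange m (M + 1) 1).toFinset :=
      Finset.eq_of_subset_of_card_le hsub hcards
    have hperm : (PySem.List.pyRange m (M + 1) 1).Perm nums :=
      (List.perm_of_nodup_nodup_toFinset_eq hnd hrnd hfeq).symm
    exact PySem.List.sorted_eq_of_perm_of_pairwise_lt nums _ _ hperm
      (PySem.List.pairwise_lt_pyRange_one m (M + 1))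

-- translating counts facts: the bucket maximum detects duplicates
lemma pvMax_iff (nums counts : List Int) (hb : ∀ n ∈ nums, 0 ≤ n ∧ n < 100)
    (hlen : counts.length = 100)
    (hcount : ∀ i : Nat, i < 100 → counts[i]? = some ((List.count (i : Int) nums : Int))) :
    (1 < (PySem.List.max? counts (fun x => x)).getD 0) ↔ ¬ nums.Nodup := by
  have hne : counts ≠ [] := by intro h; rw [h] at hlen; simp at hlen
  obtain ⟨M, hM⟩ : ∃ M, PySem.List.max? counts (fun x => x) = some M := by
    cases h : PySem.List.max? counts (fun x => x) with
    | none => exact absurd ((PySem.List.max?_eq_none_iff counts (fun x => x)).mp h) hne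
    | some M => exact ⟨M, rfl⟩
  rw [hM]; simp only [Option.getD_some]
  have hMmem : M ∈ counts := PySem.List.max?_mem hM
  have hMmax : ∀ y ∈ counts, y ≤ M := PySem.List.max?_isMax hM
  constructor
  · intro h1 hnd
    obtain ⟨i, hi, hgi⟩ := List.mem_iff_getElem.mp hMmem
    have := hcount i (by omega)
    rw [List.getElem?_eq_getElem hi, hgi] at this
    have hMc : M = (List.count (i : Int) nums : Int) := by
      exact (Option.some.injEq _ _).mp this
    have := List.nodup_iff_count_le_one.mp hnd (i : Int)
    omega
  · intro hnd
    obtain ⟨a, ha⟩ : ∃ a : Int, 1 < List.count a nums := by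
      by_contra hno
      push_neg at hno
      exact hnd (List.nodup_iff_count_le_one.mpr (fun a => by have := hno a; omega))
    have hamem : a ∈ nums := by
      rw [← List.count_pos_iff]; omega
    obtain ⟨ha0, ha1⟩ := hb a hamem
    have hca : counts[a.toNat]? = some ((List.count a nums : Int)) := by
      have := hcount a.toNat (by omega)
      rwa [Int.toNat_of_nonneg ha0] at this
    have hmem : ((List.count a nums : Int)) ∈ counts := by
      exact List.mem_of_getElem? hca
    have := hMmax _ hmem
    omega

-- with no duplicates the first (last) marked bucket is the minimum (maximum) value
lemma pvLo_eq (nums counts : List Int) (hb : ∀ n ∈ nums, 0 ≤ n ∧ n < 100)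
    (hlen : counts.length = 100)
    (hcount : ∀ i : Nat, i < 100 → counts[i]? = some ((List.count (i : Int) nums : Int)))
    (hnd : nums.Nodup) (m : Int) (hm : PySem.List.min? nums (fun x => x) = some m) :
    PySem.List.index? counts 1 = some m.toNat := by
  have hmmem : m ∈ nums := PySem.List.min?_mem hm
  have hmmin : ∀ y ∈ nums, m ≤ y := PySem.List.min?_isMin hm
  obtain ⟨hm0, hm1⟩ := hb m hmmem
  have hcg : ∀ i : Nat, (hi : i < counts.length) → counts[i] = ((List.count (i : Int) nums : Int)) := by
    intro i hi
    have := hcount i (by omega)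
    rwa [List.getElem?_eq_getElem hi, Option.some.injEq] at this
  apply pvIndex?_eq 1 counts m.toNat (by omega)
  · rw [hcg m.toNat (by omega), Int.toNat_of_nonneg hm0,
      List.count_eq_one_of_mem hnd hmmem]
    rfl
  · intro j hj
    rw [hcg j (by omega)]
    have hnot : (j : Int) ∉ nums := by
      intro hmem
      have := hmmin _ hmem
      omega
    rw [List.count_eq_zero_of_not_mem hnot]
    decide

lemma pvHi_eq (nums counts : List Int) (hb : ∀ n ∈ nums, 0 ≤ n ∧ n < 100)
    (hlen : counts.length = 100)
    (hcount : ∀ i : Nat, i < 100 → counts[i]? = some ((List.count (i : Int) nums : Int)))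
    (hnd : nums.Nodup) (M : Int) (hM : PySem.List.max? nums (fun x => x) = some M) :
    PySem.List.index? counts.reverse 1 = some (99 - M.toNat) := by
  have hMmem : M ∈ nums := PySem.List.max?_mem hM
  have hMmax : ∀ y ∈ nums, y ≤ M := PySem.List.max?_isMax hM
  obtain ⟨hM0, hM1⟩ := hb M hMmem
  have hcg : ∀ i : Nat, (hi : i < counts.length) → counts[i] = ((List.count (i : Int) nums : Int)) := by
    intro i hi
    have := hcount i (by omega)
    rwa [List.getElem?_eq_getElem hi, Option.some.injEq] at this
  have hrlen : counts.reverse.length = 100 := by simp [hlen]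
  apply pvIndex?_eq 1 counts.reverse (99 - M.toNat) (by omega)
  · rw [List.getElem_reverse]
    have h99 : counts.length - 1 - (99 - M.toNat) = M.toNat := by omega
    rw [hcg _ (by omega)]
    rw [h99, Int.toNat_of_nonneg hM0, List.count_eq_one_of_mem hnd hMmem]
    rfl
  · intro j hj
    rw [List.getElem_reverse, hcg _ (by omega)]
    have hnot : ((counts.length - 1 - j : Nat) : Int) ∉ nums := by
      intro hmem
      have := hMmax _ hmem
      have : (counts.length - 1 - j : Nat) ≤ M.toNat := by omega
      omega
    rw [List.count_eq_zero_of_not_mem hnot]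
    decide

-- ===== VERDICT (by name: the statement is the Claim_ definition above) =====
set_option maxHeartbeats 1000000 in
theorem check_for_sequential_numbers_spec : Claim_equal_check_for_sequential_numbers := by
  intro split_text _ hpre
  unfold Spec_check_for_sequential_numbers
  cases split_text with
  | nil => exact absurd rfl hpre.1
  | cons first rest =>
    by_cases hf : first = "1. "
    · subst hf
      simp only [check_for_sequential_numbers, check_for_sequential_numbers_alt,
        PySem.List.pyGetD_ofNat', List.getD_cons_zero, ne_eq, not_true_eq_false,
        if_false, and_false]
      rw [pvLoopA_gen, pvLoopB_gen]
      simp only [List.nil_append]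
      set l := "1. " :: rest with hl
      set nums := l.filterMap pvParseB with hnums
      set counts := nums.foldl pvBump (List.replicate 100 0) with hcounts
      have hb : ∀ n ∈ nums, 0 ≤ n ∧ n < 100 := pvNums_bound l
      obtain ⟨hclen, hccount⟩ := pvCounts_chars nums hb (List.replicate 100 0) (by simp)
      rw [← hcounts] at hclen hccount
      have hcount : ∀ i : Nat, i < 100 → counts[i]? = some ((List.count (i : Int) nums : Int)) := by
        intro i hi
        have := hccount i hi
        rwa [List.getElem?_replicate, if_pos (by omega : i < 100), Option.getD_some, zero_add] at this
      by_cases h2 : 1 < nums.length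
      · rw [if_pos h2, if_neg (by omega : ¬ nums.length ≤ 1)]
        have hne : nums ≠ [] := by intro h; rw [h] at h2; simp at h2
        obtain ⟨m, hm⟩ : ∃ m, PySem.List.min? nums (fun x => x) = some m := by
          cases h : PySem.List.min? nums (fun x => x) with
          | none => exact absurd ((PySem.List.min?_eq_none_iff nums (fun x => x)).mp h) hne
          | some m => exact ⟨m, rfl⟩
        obtain ⟨M, hM⟩ : ∃ M, PySem.List.max? nums (fun x => x) = some M := by
          cases h : PySem.List.max? nums (fun x => x) with
          | none => exact absurd ((PySem.List.max?_eq_none_iff nums (fun x => x)).mp h) hne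
          | some M => exact ⟨M, rfl⟩
        obtain ⟨hm0, hm1⟩ := hb m (PySem.List.min?_mem hm)
        obtain ⟨hM0, hM1⟩ := hb M (PySem.List.max?_mem hM)
        have hseq := pvSeq_iff nums h2
        rw [hm, hM] at hseq
        simp only [Option.getD_some] at hseq
        simp only [hm, hM, Option.getD_some]
        by_cases hnd : nums.Nodup
        · have hmaxc : ¬ (1 < (PySem.List.max? counts (fun x => x)).getD 0) := by
            rw [pvMax_iff nums counts hb hclen hcount]; exact fun h => h hnd
          have hlo : (((PySem.List.index? counts 1).getD 0 : Nat) : Int) = m := by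
            rw [pvLo_eq nums counts hb hclen hcount hnd m hm]
            simp [Int.toNat_of_nonneg hm0]
          have hhi : (99 : Int) - (((PySem.List.index? counts.reverse 1).getD 0 : Nat) : Int) = M := by
            rw [pvHi_eq nums counts hb hclen hcount hnd M hM]
            simp only [Option.getD_some]
            omega
          rw [if_neg hmaxc, hlo, hhi]
          by_cases hspan : M - m + 1 = (nums.length : Int)
          · rw [if_pos (hseq.mpr ⟨hnd, hspan⟩), if_pos hspan]
          · rw [if_neg (fun h => hspan (hseq.mp h).2), if_neg hspan]
        · have hmaxc : 1 < (PySem.List.max? counts (fun x => x)).getD 0 := by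
            rw [pvMax_iff nums counts hb hclen hcount]; exact hnd
          rw [if_neg (fun h => hnd (hseq.mp h).1), if_pos hmaxc]
      · rw [if_neg h2, if_pos (by omega : nums.length ≤ 1)]
    · simp [check_for_sequential_numbers, check_for_sequential_numbers_alt,
        PySem.List.pyGetD_ofNat', hf]
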